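-- pv_equiv track=rewrite | github.com/Kim-JuYong/DataStructuce_Algorithm | Algorithm/KAKAO/프렌즈4블록.py | solution
-- ===== SOURCE A (Python) =====
-- def crush_block(m, n, board):
--     temp = [[board[i][j] for j in range(n)] for i in range(m)]
--     flag = False
--     for i in range(m - 1):
--         for j in range(n - 1):
--             if board[i][j] != '-':
--                 if board[i][j] == board[i + 1][j] == board[i][j + 1] == board[i + 1][j + 1]:
--                     temp[i][j], temp[i + 1][j], temp[i + 1][j + 1], temp[i][j + 1] = '-', '-', '-', '-'
--                     flag = True
--     if flag:  # 깨질게 있었다.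
--         return [True, temp]
--     return [False, temp]
--
-- def down_block(m, n, board):
--     temp = [[board[i][j] for i in range(m - 1, -1, -1)] for j in range(n)]
--     for line in temp:
--         while '-' in line:
--             line.remove('-')
--         for i in range(m - len(line)):
--             line.append('-')
--     temp = [[temp[i][j] for i in range(n)] for j in range(m - 1, -1, -1)]
--     return temp
--
-- def solution(m, n, board):
--     answer = 0
--     while True:
--         ret = crush_block(m, n, board)
--         if not ret[0]:
--             break
--         board = ret[1]
--         board = down_block(m, n, board)
--     answer = len([1 for i in range(m) for j in range(n) if board[i][j] == '-'])
--     return answer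
-- ===== SOURCE B (Python) =====
-- def solution(m, n, board):
--     if m <= 0 or n <= 0:  # empty board: no cells at all
--         return 0
--     # Ragged bottom-aligned column stacks: stacks[j][h] is the cell of column j at
--     # height h above the floor; heights past len(stacks[j]) are blank.  Row alignment
--     # is preserved because blanks only ever accumulate on top of a column.
--     stacks = [[board[i][j] for i in range(m - 1, -1, -1)] for j in range(n)]
--     total = sum(len(st) for st in stacks)
--
--     def blocked(j, h):
--         # Is stack cell (j, h) covered by some monochrome non-blank 2x2 block?
--         for dj in (j - 1, j):
--             for dh in (h - 1, h):
--                 if 0 <= dj and 0 <= dh and dj + 1 < len(stacks):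
--                     a, b = stacks[dj], stacks[dj + 1]
--                     if dh + 1 < len(a) and dh + 1 < len(b):
--                         c = a[dh]
--                         if c != '-' and a[dh + 1] == c and b[dh] == c and b[dh + 1] == c:
--                             return True
--         return False
--
--     while any(blocked(j, h) for j in range(len(stacks)) for h in range(len(stacks[j]))):
--         stacks = [[c for h, c in enumerate(st) if c != '-' and not blocked(j, h)]
--                   for j, st in enumerate(stacks)]
--     return total - sum(1 for st in stacks for c in st if c != '-')
-- ===== Notes on version B (the rewrite author's own statement) =====
-- stated objective: alternative
-- what changed: B abandons the padded grid entirely: it keeps ragged bottom-aligned column stacks (blanks only ever sit on top, so equal stack heights mean equal rows), tests block membership with a pure 4-candidate predicate instead of a marking pass over a copied grid, removes crushed cells by one indexed filter per stack so gravity disappears as a step, and returns total cells minus surviving non-blank cells by conservation instead of scanning the final grid for '-'.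
import Mathlib
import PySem

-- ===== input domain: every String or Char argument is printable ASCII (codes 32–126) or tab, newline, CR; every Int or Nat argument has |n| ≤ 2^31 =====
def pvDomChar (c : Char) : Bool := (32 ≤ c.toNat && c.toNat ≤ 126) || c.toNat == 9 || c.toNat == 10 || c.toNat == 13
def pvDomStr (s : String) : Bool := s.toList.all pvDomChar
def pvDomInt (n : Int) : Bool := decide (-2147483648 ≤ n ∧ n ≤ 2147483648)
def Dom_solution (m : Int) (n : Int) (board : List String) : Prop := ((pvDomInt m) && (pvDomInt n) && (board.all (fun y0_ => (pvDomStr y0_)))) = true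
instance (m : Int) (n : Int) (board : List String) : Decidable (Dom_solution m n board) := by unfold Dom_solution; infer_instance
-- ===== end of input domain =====

-- B replaces the padded grid by ragged bottom-aligned column stks: blocks are found
-- by a pure 4-candidate predicate, crushing is one indexed filter per stack (no gravity
-- step, no grid copy), and the answer is total cells minus surviving non-blank cells.

-- ===== PORT A =====
-- cell read g[i][j] / write g[i][j] = c; all reads/writes are in range on inputs Pre_ admits
def pvGet2 (g : List (List Char)) (i j : Nat) : Char := (g.getD i []).getD j ' '
def pvSet2 (g : List (List Char)) (i j : Nat) (c : Char) : List (List Char) :=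
  g.set i ((g.getD i []).set j c)

-- board[i][j] == board[i+1][j] == board[i][j+1] == board[i+1][j+1]  (Python chained comparison)
def pvCondA (g : List (List Char)) (i j : Nat) : Bool :=
  pvGet2 g i j == pvGet2 g (i+1) j && pvGet2 g (i+1) j == pvGet2 g i (j+1)
    && pvGet2 g i (j+1) == pvGet2 g (i+1) (j+1)

def pvCrushA (m n : Nat) (g : List (List Char)) : Bool × List (List Char) :=
  let temp := (List.range m).map (fun i => (List.range n).map (fun j => pvGet2 g i j))
  let r := ((List.range (m-1)).flatMap (fun i => (List.range (n-1)).map (fun j => (i, j)))).foldl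
    (fun (s : List (List Char) × Bool) (p : Nat × Nat) =>
      if pvGet2 g p.1 p.2 ≠ '-' then
        if pvCondA g p.1 p.2 then
          (pvSet2 (pvSet2 (pvSet2 (pvSet2 s.1 p.1 p.2 '-') (p.1+1) p.2 '-') (p.1+1) (p.2+1) '-') p.1 (p.2+1) '-', true)
        else s
      else s)
    (temp, false)
  (r.2, r.1)

-- while '-' in line: line.remove('-')   (list.remove drops the first occurrence = List.erase)
def pvRemoveAll (l : List Char) : List Char :=
  if h : '-' ∈ l then pvRemoveAll (l.erase '-') else l

termination_by l.length
decreasing_by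
  have h1 := List.length_erase_of_mem h
  have h2 := List.length_pos_of_mem h
  omega

def pvDownA (m n : Nat) (g : List (List Char)) : List (List Char) :=
  (List.range m).reverse.map (fun j =>
    (List.range n).map (fun i =>
      pvGet2
        (((List.range n).map (fun j' => (List.range m).reverse.map (fun i' => pvGet2 g i' j'))).map
          (fun line => pvRemoveAll line ++ List.replicate (m - (pvRemoveAll line).length) '-'))
        i j))

-- the while-True loop; fuel m*n+1 always suffices (each crushing round empties ≥ 4 cells)
def pvLoopA (m n : Nat) : Nat → List (List Char) → List (List Char)
  | 0, g => g
  | fuel+1, g =>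
    let ret := pvCrushA m n g
    if ret.1 then pvLoopA m n fuel (pvDownA m n ret.2) else g

def solution (m : Int) (n : Int) (board : List String) : Int :=
  -- board[i][j] on a string is its j-th character: rows become char lists, read identically
  (((List.range m.toNat).flatMap (fun i =>
      (List.range n.toNat).filter (fun j =>
        pvGet2 (pvLoopA m.toNat n.toNat (m.toNat * n.toNat + 1)
          (board.map (fun s => s.toList))) i j == '-'))).length : Int)

-- ===== PORT B =====
-- the inner test of blocked(): a monochrome non-blank 2x2 block anchored at stack cell (dj, dh)
def pvBlockAt (stks : List (List Char)) (dj dh : Nat) : Bool :=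
  let a := stks.getD dj []
  let b := stks.getD (dj + 1) []
  if dh + 1 < a.length && dh + 1 < b.length then
    let c := a.getD dh ' '
    c != '-' && a.getD (dh + 1) ' ' == c && b.getD dh ' ' == c && b.getD (dh + 1) ' ' == c
  else false

-- blocked(j, h): the four candidate anchors, with Python's 0<=dj / 0<=dh / dj+1<len guards
def pvBlocked (stks : List (List Char)) (j h : Int) : Bool :=
  [j - 1, j].any fun dj => [h - 1, h].any fun dh =>
    decide (0 ≤ dj) && decide (0 ≤ dh) && decide (dj + 1 < (stks.length : Int))
      && pvBlockAt stks dj.toNat dh.toNat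

-- any(blocked(j, h) for j in range(len(stks)) for h in range(len(stks[j])))
def pvAnyBlocked (stks : List (List Char)) : Bool :=
  (List.range stks.length).any fun j =>
    (List.range (stks.getD j []).length).any fun h => pvBlocked stks (j : Int) (h : Int)

-- [[c for h, c in enumerate(st) if c != '-' and not blocked(j, h)] for j, st in enumerate(stks)]
def pvCompact (stks : List (List Char)) : List (List Char) :=
  (PySem.List.enumerate stks).map fun p =>
    ((PySem.List.enumerate p.2).filter (fun q => q.2 != '-' && !pvBlocked stks p.1 q.1)).map
      (fun q => q.2)

-- the while loop; fuel m*n+1 always suffices (each crushing round removes ≥ 4 stack cells)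
def pvLoopB : Nat → List (List Char) → List (List Char)
  | 0, stks => stks
  | fuel+1, stks => if pvAnyBlocked stks then pvLoopB fuel (pvCompact stks) else stks

def solution_alt (m : Int) (n : Int) (board : List String) : Int :=
  if m ≤ 0 ∨ n ≤ 0 then 0
  else
  let stacks0 := (List.range n.toNat).map (fun j =>
    (List.range m.toNat).reverse.map (fun i => (board.getD i "").toList.getD j ' '))
  let total := (stacks0.map List.length).sum
  let final := pvLoopB (m.toNat * n.toNat + 1) stacks0
  (total : Int) - (((final.map (fun st => st.countP (fun c => c != '-'))).sum : Nat) : Int)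

-- ===== PRECONDITION & SPEC =====
-- Pre_ excludes exactly the inputs where Python A raises IndexError: with m, n ≥ 1 every cell
-- board[i][j], i < m, j < n, is read, so the board needs ≥ m rows whose first m rows have ≥ n chars.
def Pre_solution (m : Int) (n : Int) (board : List String) : Prop :=
  m ≤ 0 ∨ n ≤ 0 ∨ (m ≤ (board.length : Int) ∧ ∀ s ∈ board.take m.toNat, n ≤ (s.toList.length : Int))
instance (m : Int) (n : Int) (board : List String) : Decidable (Pre_solution m n board) := by
  unfold Pre_solution; infer_instance

def pvWitness_solution : Int × Int × List String := (2, 2, ["ab", "cb"])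

def Spec_solution (m : Int) (n : Int) (board : List String) (out : Int) : Prop := out = solution_alt m n board
instance (m : Int) (n : Int) (board : List String) (out : Int) : Decidable (Spec_solution m n board out) := by unfold Spec_solution; infer_instance

-- ===== CLAIM (what is proved, stated in full; the proofs are below) =====
def Claim_equal_solution : Prop := ∀ (m : Int) (n : Int) (board : List String), Dom_solution m n board → Pre_solution m n board → Spec_solution m n board (solution m n board)

-- ===== LEMMAS AND PROOFS =====

-- A's block condition at (i, j), and coverage of cell (a, b) by the 2x2 block at (i, j)
def pvP (g : List (List Char)) (i j : Nat) : Bool := (pvGet2 g i j != '-') && pvCondA g i j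
def pvCov (i j a b : Nat) : Bool := (a == i || a == i+1) && (b == j || b == j+1)
def pvMk (M N : Nat) (g : List (List Char)) (a b : Nat) : Bool :=
  (List.range (M-1)).any (fun i => (List.range (N-1)).any (fun j => pvP g i j && pvCov i j a b))

lemma pv_getD_map_range {α : Type} (M : Nat) (f : Nat → α) (d : α) {a : Nat} (h : a < M) :
    ((List.range M).map f).getD a d = f a := by
  rw [List.getD_eq_getElem _ _ (by simpa using h)]
  simp

lemma pv_getD_map_range_rev {α : Type} (M : Nat) (f : Nat → α) (d : α) {a : Nat} (h : a < M) :
    ((List.range M).reverse.map f).getD a d = f (M - 1 - a) := by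
  rw [List.getD_eq_getElem _ _ (by simpa using h)]
  simp [List.getElem_reverse]

lemma pv_getD_set {α : Type} (L : List α) (i a : Nat) (x d : α) :
    (L.set i x).getD a d = if i = a ∧ i < L.length then x else L.getD a d := by
  by_cases h : i = a
  · subst h
    by_cases h2 : i < L.length
    · simp [List.getD_eq_getElem?_getD, h2]
    · simp [List.getD_eq_getElem?_getD, h2]
  · simp [List.getD_eq_getElem?_getD, h]

lemma pv_get2_set2 (t : List (List Char)) (i j : Nat) (c : Char)
    (hi : i < t.length) (hj : j < (t.getD i []).length) (a b : Nat) :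
    pvGet2 (pvSet2 t i j c) a b = if a = i ∧ b = j then c else pvGet2 t a b := by
  unfold pvGet2 pvSet2
  rw [pv_getD_set]
  by_cases hai : i = a
  · subst hai
    rw [if_pos ⟨rfl, hi⟩, pv_getD_set]
    by_cases hbj : j = b
    · subst hbj
      simp only [List.getD_eq_getElem?_getD] at hj
      simp [hj]
    · rw [if_neg (fun h => hbj h.1),
        if_neg (show ¬(i = i ∧ b = j) from fun h => hbj h.2.symm)]
  · rw [if_neg (fun h => hai h.1),
      if_neg (show ¬(a = i ∧ b = j) from fun h => hai h.1.symm)]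

-- the body of A's marking loop, named for the proofs
def pvStep (g : List (List Char)) (s : List (List Char) × Bool) (p : Nat × Nat) :
    List (List Char) × Bool :=
  if pvGet2 g p.1 p.2 ≠ '-' then
    if pvCondA g p.1 p.2 then
      (pvSet2 (pvSet2 (pvSet2 (pvSet2 s.1 p.1 p.2 '-') (p.1+1) p.2 '-') (p.1+1) (p.2+1) '-') p.1 (p.2+1) '-', true)
    else s
  else s

def pvSet4 (t : List (List Char)) (i j : Nat) : List (List Char) :=
  pvSet2 (pvSet2 (pvSet2 (pvSet2 t i j '-') (i+1) j '-') (i+1) (j+1) '-') i (j+1) '-'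

lemma pv_rowlen {M N : Nat} (t : List (List Char)) (hlen : t.length = M)
    (hrow : ∀ r ∈ t, r.length = N) {i : Nat} (hi : i < M) : (t.getD i []).length = N := by
  have hg : t[i]? = some t[i] := List.getElem?_eq_getElem (by omega)
  rw [List.getD_eq_getElem?_getD, hg]
  exact hrow _ (List.getElem_mem _)

lemma pv_wf_set2 {M N : Nat} (t : List (List Char)) (hlen : t.length = M)
    (hrow : ∀ r ∈ t, r.length = N) (i j : Nat) (c : Char) (hi : i < M) :
    (pvSet2 t i j c).length = M ∧ ∀ r ∈ pvSet2 t i j c, r.length = N := by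
  refine ⟨by simp [pvSet2, hlen], ?_⟩
  intro r hr
  rcases List.mem_or_eq_of_mem_set hr with h | rfl
  · exact hrow _ h
  · simpa using pv_rowlen t hlen hrow hi

lemma pv_wf_set4 {M N : Nat} (t : List (List Char)) (hlen : t.length = M)
    (hrow : ∀ r ∈ t, r.length = N) (i j : Nat) (hi : i + 1 < M) (hj : j + 1 < N) :
    (pvSet4 t i j).length = M ∧ ∀ r ∈ pvSet4 t i j, r.length = N := by
  obtain ⟨hl1, hr1⟩ := pv_wf_set2 t hlen hrow i j '-' (by omega)
  obtain ⟨hl2, hr2⟩ := pv_wf_set2 _ hl1 hr1 (i+1) j '-' (by omega)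
  obtain ⟨hl3, hr3⟩ := pv_wf_set2 _ hl2 hr2 (i+1) (j+1) '-' (by omega)
  exact pv_wf_set2 _ hl3 hr3 i (j+1) '-' (by omega)

lemma pv_get2_set4 {M N : Nat} (t : List (List Char)) (hlen : t.length = M)
    (hrow : ∀ r ∈ t, r.length = N) (i j : Nat) (hi : i + 1 < M) (hj : j + 1 < N) (a b : Nat) :
    pvGet2 (pvSet4 t i j) a b = if pvCov i j a b then '-' else pvGet2 t a b := by
  obtain ⟨hl1, hr1⟩ := pv_wf_set2 t hlen hrow i j '-' (by omega)
  obtain ⟨hl2, hr2⟩ := pv_wf_set2 _ hl1 hr1 (i+1) j '-' (by omega)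
  obtain ⟨hl3, hr3⟩ := pv_wf_set2 _ hl2 hr2 (i+1) (j+1) '-' (by omega)
  unfold pvSet4
  rw [pv_get2_set2 _ _ _ _ (by omega) (by rw [pv_rowlen _ hl3 hr3 (by omega : i < M)]; omega),
    pv_get2_set2 _ _ _ _ (by omega) (by rw [pv_rowlen _ hl2 hr2 (by omega : i + 1 < M)]; omega),
    pv_get2_set2 _ _ _ _ (by omega) (by rw [pv_rowlen _ hl1 hr1 (by omega : i + 1 < M)]; omega),
    pv_get2_set2 _ _ _ _ (by omega) (by rw [pv_rowlen _ hlen hrow (by omega : i < M)]; omega)]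
  simp only [pvCov, Bool.and_eq_true, Bool.or_eq_true, beq_iff_eq]
  split_ifs <;> first | rfl | omega

lemma pv_crush_fold (g : List (List Char)) {M N : Nat}
    (ps : List (Nat × Nat)) (hps : ∀ p ∈ ps, p.1 + 1 < M ∧ p.2 + 1 < N) :
    ∀ (t : List (List Char)) (f : Bool), t.length = M → (∀ r ∈ t, r.length = N) →
    (ps.foldl (pvStep g) (t, f)).2 = (f || ps.any (fun p => pvP g p.1 p.2))
    ∧ (ps.foldl (pvStep g) (t, f)).1.length = M
    ∧ (∀ r ∈ (ps.foldl (pvStep g) (t, f)).1, r.length = N)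
    ∧ ∀ a b : Nat, a < M → b < N →
        pvGet2 (ps.foldl (pvStep g) (t, f)).1 a b
          = if ps.any (fun p => pvP g p.1 p.2 && pvCov p.1 p.2 a b) then '-' else pvGet2 t a b := by
  induction ps with
  | nil => intro t f hlen hrow; exact ⟨by simp, hlen, hrow, fun a b _ _ => by simp⟩
  | cons p ps ih =>
    intro t f hlen hrow
    have hp := hps p (List.mem_cons_self ..)
    have hps' : ∀ q ∈ ps, q.1 + 1 < M ∧ q.2 + 1 < N := fun q hq => hps q (List.mem_cons_of_mem _ hq)
    simp only [List.foldl_cons]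
    by_cases h1 : pvP g p.1 p.2 = true
    · have h1' := h1
      unfold pvP at h1'
      simp only [Bool.and_eq_true, bne_iff_ne, ne_eq] at h1'
      have hd : pvStep g (t, f) p = (pvSet4 t p.1 p.2, true) := by
        simp [pvStep, pvSet4, h1'.1, h1'.2]
      rw [hd]
      obtain ⟨hl4, hr4⟩ := pv_wf_set4 t hlen hrow p.1 p.2 hp.1 hp.2
      obtain ⟨ihs, ihl, ihr, ihg⟩ := ih hps' (pvSet4 t p.1 p.2) true hl4 hr4
      refine ⟨by simp [ihs, h1], ihl, ihr, ?_⟩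
      intro a b ha hb
      rw [ihg a b ha hb, pv_get2_set4 t hlen hrow p.1 p.2 hp.1 hp.2 a b]
      simp only [List.any_cons, h1, Bool.true_and]
      by_cases hc : pvCov p.1 p.2 a b = true
      · simp [hc]
      · cases hany : ps.any (fun q => pvP g q.1 q.2 && pvCov q.1 q.2 a b) <;>
          simp [hc]
    · have h1' : pvP g p.1 p.2 = false := by
        cases hh : pvP g p.1 p.2
        · rfl
        · exact absurd hh h1
      have hd : pvStep g (t, f) p = (t, f) := by
        by_cases hA : pvGet2 g p.1 p.2 ≠ '-'
        · have hB : pvCondA g p.1 p.2 = false := by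
            unfold pvP at h1'
            simpa [Bool.and_eq_true, bne_iff_ne, hA] using h1'
          simp [pvStep, hA, hB]
        · simp [pvStep, hA]
      rw [hd]
      obtain ⟨ihs, ihl, ihr, ihg⟩ := ih hps' t f hlen hrow
      refine ⟨by simp [ihs, h1'], ihl, ihr, ?_⟩
      intro a b ha hb
      rw [ihg a b ha hb]
      simp only [List.any_cons, h1', Bool.false_and, Bool.false_or]

lemma pv_get2_temp (M N : Nat) (g : List (List Char)) {a b : Nat} (ha : a < M) (hb : b < N) :
    pvGet2 ((List.range M).map (fun i => (List.range N).map (fun j => pvGet2 g i j))) a b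
      = pvGet2 g a b := by
  show (((List.range M).map (fun i => (List.range N).map (fun j => pvGet2 g i j))).getD a []).getD b ' ' = _
  rw [pv_getD_map_range _ _ _ ha, pv_getD_map_range _ _ _ hb]

lemma pv_pairsA_bounds (M N : Nat) :
    ∀ p ∈ (List.range (M-1)).flatMap (fun i => (List.range (N-1)).map (fun j => (i, j))),
      p.1 + 1 < M ∧ p.2 + 1 < N := by
  intro p hp
  simp only [List.mem_flatMap, List.mem_map, List.mem_range] at hp
  obtain ⟨i, hi, j, hj, rfl⟩ := hp
  omega

lemma pvCrushA_eq (M N : Nat) (g : List (List Char)) :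
    pvCrushA M N g =
      ((((List.range (M-1)).flatMap (fun i => (List.range (N-1)).map (fun j => (i, j)))).foldl
          (pvStep g)
          ((List.range M).map (fun i => (List.range N).map (fun j => pvGet2 g i j)), false)).2,
        (((List.range (M-1)).flatMap (fun i => (List.range (N-1)).map (fun j => (i, j)))).foldl
          (pvStep g)
          ((List.range M).map (fun i => (List.range N).map (fun j => pvGet2 g i j)), false)).1) := rfl

-- crush characterization
lemma pvCrushA_snd (M N : Nat) (g : List (List Char)) :
    (pvCrushA M N g).1 = (List.range (M-1)).any (fun i => (List.range (N-1)).any (fun j => pvP g i j)) := by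
  rw [pvCrushA_eq]
  obtain ⟨hs, -, -, -⟩ := pv_crush_fold g _ (pv_pairsA_bounds M N)
    ((List.range M).map (fun i => (List.range N).map (fun j => pvGet2 g i j))) false
    (by simp) (by intro r hr; simp only [List.mem_map] at hr; obtain ⟨i, -, rfl⟩ := hr; simp)
  rw [hs]
  simp only [List.any_flatMap, List.any_map, Bool.false_or]
  rfl

lemma pvCrushA_get (M N : Nat) (g : List (List Char)) {a b : Nat} (ha : a < M) (hb : b < N) :
    pvGet2 (pvCrushA M N g).2 a b = if pvMk M N g a b then '-' else pvGet2 g a b := by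
  rw [pvCrushA_eq]
  obtain ⟨-, -, -, hg2⟩ := pv_crush_fold g _ (pv_pairsA_bounds M N)
    ((List.range M).map (fun i => (List.range N).map (fun j => pvGet2 g i j))) false
    (by simp) (by intro r hr; simp only [List.mem_map] at hr; obtain ⟨i, -, rfl⟩ := hr; simp)
  have hmk : (((List.range (M-1)).flatMap (fun i => (List.range (N-1)).map (fun j => (i, j)))).any
      (fun p => pvP g p.1 p.2 && pvCov p.1 p.2 a b)) = pvMk M N g a b := by
    simp only [pvMk, List.any_flatMap, List.any_map]
    rfl
  rw [hg2 a b ha hb, hmk, pv_get2_temp M N g ha hb]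

lemma pv_filter_erase_dash (l : List Char) : (l.erase '-').filter (· != '-') = l.filter (· != '-') := by
  induction l with
  | nil => rfl
  | cons x xs ih =>
    by_cases hx : x = '-'
    · subst hx; simp
    · simp [hx, ih]

lemma pvRemoveAll_eq_filter (l : List Char) : pvRemoveAll l = l.filter (· != '-') := by
  induction l using pvRemoveAll.induct with
  | case1 l h ih =>
    rw [pvRemoveAll, dif_pos h, ih, pv_filter_erase_dash]
  | case2 l h =>
    rw [pvRemoveAll, dif_neg h]
    symm
    rw [List.filter_eq_self]
    intro c hc
    simp only [bne_iff_ne, ne_eq]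
    exact fun hcd => h (hcd ▸ hc)

-- the column of A's gravity result: survivors of the old column with '-'-padding on top
lemma pvDownA_col (M N : Nat) (G : List (List Char)) {j : Nat} (hj : j < N) :
    (List.range M).map (fun a => pvGet2 (pvDownA M N G) a j)
      = List.replicate (M - (((List.range M).map (fun i => pvGet2 G i j)).filter (fun c => c != '-')).length) '-'
        ++ ((List.range M).map (fun i => pvGet2 G i j)).filter (fun c => c != '-') := by
  have hX : ∀ a, a < M →
      pvGet2 (pvDownA M N G) a j
        = ((((List.range M).map (fun i => pvGet2 G i j)).filter (fun c => c != '-')).reverse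
            ++ List.replicate (M - (((List.range M).map (fun i => pvGet2 G i j)).filter (fun c => c != '-')).length) '-').getD (M-1-a) ' ' := by
    intro a ha
    show ((pvDownA M N G).getD a []).getD j ' ' = _
    unfold pvDownA
    rw [pv_getD_map_range_rev _ _ _ ha, pv_getD_map_range _ _ _ hj]
    show (((((List.range N).map _).map _).getD j []).getD (M-1-a) ' ') = _
    rw [List.map_map, pv_getD_map_range _ _ _ hj]
    simp only [Function.comp_apply]
    rw [show (List.range M).reverse.map (fun i' => pvGet2 G i' j)
        = ((List.range M).map (fun i' => pvGet2 G i' j)).reverse from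
      List.map_reverse]
    rw [pvRemoveAll_eq_filter, List.filter_reverse, List.length_reverse]
  have klen : (((List.range M).map (fun i => pvGet2 G i j)).filter (fun c => c != '-')).length ≤ M := by
    calc (((List.range M).map (fun i => pvGet2 G i j)).filter (fun c => c != '-')).length
        ≤ ((List.range M).map (fun i => pvGet2 G i j)).length := List.length_filter_le _ _
      _ = M := by simp
  have hpadlen : ((((List.range M).map (fun i => pvGet2 G i j)).filter (fun c => c != '-')).reverse
      ++ List.replicate (M - (((List.range M).map (fun i => pvGet2 G i j)).filter (fun c => c != '-')).length) '-').length = M := by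
    simp
    omega
  have hrev : (List.range M).map (fun a => pvGet2 (pvDownA M N G) a j)
      = ((((List.range M).map (fun i => pvGet2 G i j)).filter (fun c => c != '-')).reverse
          ++ List.replicate (M - (((List.range M).map (fun i => pvGet2 G i j)).filter (fun c => c != '-')).length) '-').reverse := by
    apply List.ext_getElem
    · simp only [List.length_map, List.length_range, List.length_reverse, hpadlen]
    · intro a ha1 ha2
      have haM : a < M := by simpa using ha1
      simp only [List.getElem_map, List.getElem_range]
      rw [hX a haM, List.getElem_reverse,
        List.getD_eq_getElem _ _ (by rw [hpadlen]; omega)]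
      congr 1
      rw [hpadlen]
  rw [hrev, List.reverse_append, List.reverse_reverse, List.reverse_replicate]

-- ===== the invariant tying A's padded grid to B's ragged stks =====
def pvInv (M N : Nat) (g stks : List (List Char)) : Prop :=
  stks.length = N ∧ ∀ j, j < N →
    (stks.getD j []).length ≤ M ∧
    (List.range M).map (fun i => pvGet2 g i j)
      = List.replicate (M - (stks.getD j []).length) '-' ++ (stks.getD j []).reverse

lemma pv_inv_cell {M N : Nat} {g stks : List (List Char)} (hInv : pvInv M N g stks)
    {j i : Nat} (hj : j < N) (hi : i < M) :
    pvGet2 g i j = if M - 1 - i < (stks.getD j []).length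
      then (stks.getD j []).getD (M - 1 - i) ' ' else '-' := by
  obtain ⟨-, hcol⟩ := hInv
  obtain ⟨hL, heq⟩ := hcol j hj
  have h2 : pvGet2 g i j
      = (List.replicate (M - (stks.getD j []).length) '-' ++ (stks.getD j []).reverse).getD i ' ' := by
    rw [← heq]
    exact (pv_getD_map_range M (fun i => pvGet2 g i j) ' ' hi).symm
  rw [h2]
  set st := stks.getD j []
  by_cases hlt : i < M - st.length
  · rw [if_neg (by omega), List.getD_eq_getElem _ _ (by simp; omega)]
    rw [List.getElem_append_left (by simpa using hlt)]
    simp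
  · rw [if_pos (by omega), List.getD_eq_getElem _ _ (by simp; omega),
      List.getElem_append_right (by simpa using hlt)]
    rw [List.getElem_reverse]
    rw [List.getD_eq_getElem _ _ (by omega)]
    congr 1
    simp
    omega

lemma pvBlockAt_eq (stks : List (List Char)) (dj dh : Nat) :
    pvBlockAt stks dj dh
      = if dh + 1 < (stks.getD dj []).length && dh + 1 < (stks.getD (dj+1) []).length then
          ((stks.getD dj []).getD dh ' ' != '-'
            && (stks.getD dj []).getD (dh+1) ' ' == (stks.getD dj []).getD dh ' '
            && (stks.getD (dj+1) []).getD dh ' ' == (stks.getD dj []).getD dh ' '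
            && (stks.getD (dj+1) []).getD (dh+1) ' ' == (stks.getD dj []).getD dh ' ')
        else false := rfl

lemma pvBlockAt_true_iff (stks : List (List Char)) (dj dh : Nat)
    (hca : dh + 1 < (stks.getD dj []).length) (hcb : dh + 1 < (stks.getD (dj+1) []).length) :
    pvBlockAt stks dj dh = true ↔
      ((stks.getD dj []).getD dh ' ' ≠ '-'
        ∧ (stks.getD dj []).getD (dh+1) ' ' = (stks.getD dj []).getD dh ' '
        ∧ (stks.getD (dj+1) []).getD dh ' ' = (stks.getD dj []).getD dh ' '
        ∧ (stks.getD (dj+1) []).getD (dh+1) ' ' = (stks.getD dj []).getD dh ' ') := by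
  rw [pvBlockAt_eq, if_pos (by simp only [Bool.and_eq_true, decide_eq_true_eq]; exact ⟨hca, hcb⟩)]
  simp only [Bool.and_eq_true, beq_iff_eq, bne_iff_ne, ne_eq, and_assoc]

lemma pvBlockAt_false (stks : List (List Char)) (dj dh : Nat)
    (h : ¬(dh + 1 < (stks.getD dj []).length ∧ dh + 1 < (stks.getD (dj+1) []).length)) :
    pvBlockAt stks dj dh = false := by
  rw [pvBlockAt_eq, if_neg (by simp only [Bool.and_eq_true, decide_eq_true_eq]; exact h)]

lemma pvP_iff (g : List (List Char)) (i j : Nat) :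
    pvP g i j = true ↔ (pvGet2 g i j ≠ '-' ∧ pvGet2 g i j = pvGet2 g (i+1) j
      ∧ pvGet2 g (i+1) j = pvGet2 g i (j+1) ∧ pvGet2 g i (j+1) = pvGet2 g (i+1) (j+1)) := by
  simp only [pvP, pvCondA, Bool.and_eq_true, beq_iff_eq, bne_iff_ne, ne_eq, and_assoc]

lemma pv_blockAt_iff {M N : Nat} {g stks : List (List Char)} (hInv : pvInv M N g stks)
    (dj dh : Nat) (hdj : dj + 1 < N) :
    pvBlockAt stks dj dh = true ↔ dh + 1 < M ∧ pvP g (M - 2 - dh) dj = true := by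
  have hLa : (stks.getD dj []).length ≤ M := (hInv.2 dj (by omega)).1
  have hLb : (stks.getD (dj+1) []).length ≤ M := (hInv.2 (dj+1) hdj).1
  by_cases hca : dh + 1 < (stks.getD dj []).length
  · by_cases hcb : dh + 1 < (stks.getD (dj+1) []).length
    · have hdhM : dh + 1 < M := by omega
      have c1 : pvGet2 g (M - 2 - dh) dj = (stks.getD dj []).getD (dh+1) ' ' := by
        rw [pv_inv_cell hInv (by omega) (by omega),
          show M - 1 - (M - 2 - dh) = dh + 1 by omega, if_pos hca]
      have c2 : pvGet2 g (M - 2 - dh + 1) dj = (stks.getD dj []).getD dh ' ' := by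
        rw [pv_inv_cell hInv (by omega) (by omega),
          show M - 1 - (M - 2 - dh + 1) = dh by omega, if_pos (by omega)]
      have c3 : pvGet2 g (M - 2 - dh) (dj+1) = (stks.getD (dj+1) []).getD (dh+1) ' ' := by
        rw [pv_inv_cell hInv hdj (by omega),
          show M - 1 - (M - 2 - dh) = dh + 1 by omega, if_pos hcb]
      have c4 : pvGet2 g (M - 2 - dh + 1) (dj+1) = (stks.getD (dj+1) []).getD dh ' ' := by
        rw [pv_inv_cell hInv hdj (by omega),
          show M - 1 - (M - 2 - dh + 1) = dh by omega, if_pos (by omega)]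
      rw [pvBlockAt_true_iff _ _ _ hca hcb, pvP_iff, c1, c2, c3, c4]
      constructor
      · rintro ⟨h1, h2, h3, h4⟩
        exact ⟨hdhM, by simp_all, by simp_all, by simp_all⟩
      · rintro ⟨-, h1, h2, h3, h4⟩
        exact ⟨by simp_all, by simp_all, by simp_all, by simp_all⟩
    · rw [pvBlockAt_false _ _ _ (by tauto)]
      simp only [Bool.false_eq_true, false_iff, not_and]
      intro hdhM hP
      rw [pvP_iff] at hP
      obtain ⟨h1, h2, h3, -⟩ := hP
      have v3 := pv_inv_cell hInv (j := dj+1) (i := M - 2 - dh) hdj (by omega)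
      rw [show M - 1 - (M - 2 - dh) = dh + 1 by omega, if_neg (by omega)] at v3
      exact h1 (h2.trans (h3.trans v3))
  · rw [pvBlockAt_false _ _ _ (by tauto)]
    simp only [Bool.false_eq_true, false_iff, not_and]
    intro hdhM hP
    rw [pvP_iff] at hP
    obtain ⟨h1, -⟩ := hP
    have v1 := pv_inv_cell hInv (j := dj) (i := M - 2 - dh) (by omega) (by omega)
    rw [show M - 1 - (M - 2 - dh) = dh + 1 by omega, if_neg (by omega)] at v1
    exact h1 v1

lemma pv_blocked_eq {M N : Nat} {g stks : List (List Char)} (hInv : pvInv M N g stks)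
    (j h : Nat) (hj : j < N) (hh : h < (stks.getD j []).length) :
    pvBlocked stks (j : Int) (h : Int) = pvMk M N g (M - 1 - h) j := by
  have hLen : stks.length = N := hInv.1
  have hL : (stks.getD j []).length ≤ M := (hInv.2 j hj).1
  apply Bool.eq_iff_iff.mpr
  simp only [pvBlocked, List.any_cons, List.any_nil, Bool.or_false, Bool.or_eq_true,
    Bool.and_eq_true, decide_eq_true_eq, and_assoc, hLen]
  have hMk : pvMk M N g (M - 1 - h) j = true ↔
      ∃ i < M - 1, ∃ j' < N - 1, pvP g i j' = true ∧
        ((M - 1 - h = i ∨ M - 1 - h = i + 1) ∧ (j = j' ∨ j = j' + 1)) := by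
    simp only [pvMk, List.any_eq_true, List.mem_range, Bool.and_eq_true, pvCov,
      Bool.or_eq_true, beq_iff_eq]
  rw [hMk]
  constructor
  · rintro h4
    have key : ∀ dj dh : Int, 0 ≤ dj → 0 ≤ dh → dj + 1 < (N : Int) →
        pvBlockAt stks dj.toNat dh.toNat = true →
        (dj = (j : Int) - 1 ∨ dj = (j : Int)) → (dh = (h : Int) - 1 ∨ dh = (h : Int)) →
        ∃ i < M - 1, ∃ j' < N - 1, pvP g i j' = true ∧
          ((M - 1 - h = i ∨ M - 1 - h = i + 1) ∧ (j = j' ∨ j = j' + 1)) := by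
      intro dj dh hdj0 hdh0 hdjN hBA hdjc hdhc
      have hdjN' : dj.toNat + 1 < N := by omega
      obtain ⟨hdhM, hP⟩ := (pv_blockAt_iff hInv dj.toNat dh.toNat hdjN').mp hBA
      refine ⟨M - 2 - dh.toNat, by omega, dj.toNat, by omega, hP, ?_, ?_⟩
      · rcases hdhc with h1 | h1
        · left; omega
        · right; omega
      · rcases hdjc with h1 | h1
        · right; omega
        · left; omega
    rcases h4 with (⟨h1, h2, h3, h5⟩ | ⟨h1, h2, h3, h5⟩) | (⟨h1, h2, h3, h5⟩ | ⟨h1, h2, h3, h5⟩)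
    · exact key _ _ h1 h2 h3 h5 (Or.inl rfl) (Or.inl rfl)
    · exact key _ _ h1 h2 h3 h5 (Or.inl rfl) (Or.inr rfl)
    · exact key _ _ h1 h2 h3 h5 (Or.inr rfl) (Or.inl rfl)
    · exact key _ _ h1 h2 h3 h5 (Or.inr rfl) (Or.inr rfl)
  · rintro ⟨i, hi, j', hj', hP, hcova, hcovb⟩
    have hBA : pvBlockAt stks j' (M - 2 - i) = true := by
      rw [pv_blockAt_iff hInv j' (M - 2 - i) (by omega)]
      exact ⟨by omega, by rw [show M - 2 - (M - 2 - i) = i by omega]; exact hP⟩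
    have hhM : h ≤ M - 1 := by omega
    rcases hcova with ha1 | ha1 <;> rcases hcovb with hb1 | hb1
    · refine Or.inr (Or.inl ⟨by omega, by omega, by omega, ?_⟩)
      rw [show ((j : Int)).toNat = j' by omega, show (((h : Int)) - 1).toNat = M - 2 - i by omega]
      exact hBA
    · refine Or.inl (Or.inl ⟨by omega, by omega, by omega, ?_⟩)
      rw [show ((j : Int) - 1).toNat = j' by omega, show (((h : Int)) - 1).toNat = M - 2 - i by omega]
      exact hBA
    · refine Or.inr (Or.inr ⟨by omega, by omega, by omega, ?_⟩)
      rw [show ((j : Int)).toNat = j' by omega, show ((h : Int)).toNat = M - 2 - i by omega]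
      exact hBA
    · refine Or.inl (Or.inr ⟨by omega, by omega, by omega, ?_⟩)
      rw [show ((j : Int) - 1).toNat = j' by omega, show ((h : Int)).toNat = M - 2 - i by omega]
      exact hBA

-- B finds a blocked stack cell exactly when A's crush pass sets its flag
lemma pv_any_eq {M N : Nat} {g stks : List (List Char)} (hInv : pvInv M N g stks) :
    pvAnyBlocked stks = (pvCrushA M N g).1 := by
  rw [pvCrushA_snd]
  apply Bool.eq_iff_iff.mpr
  simp only [pvAnyBlocked, List.any_eq_true, List.mem_range, hInv.1]
  constructor
  · rintro ⟨j, hj, h, hh, hB⟩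
    rw [pv_blocked_eq hInv j h hj hh] at hB
    simp only [pvMk, List.any_eq_true, List.mem_range, Bool.and_eq_true] at hB
    obtain ⟨i, hi, j', hj', hP, -⟩ := hB
    exact ⟨i, hi, j', hj', hP⟩
  · rintro ⟨i, hi, j', hj', hP⟩
    obtain ⟨hne, e1, -⟩ := (pvP_iff g i j').mp hP
    -- the bottom-left cell of the block is non-blank, hence inside the stack
    have hcell := pv_inv_cell hInv (j := j') (i := i+1) (by omega) (by omega)
    have hh : M - 2 - i < (stks.getD j' []).length := by
      by_contra hcon
      rw [show M - 1 - (i+1) = M - 2 - i by omega, if_neg (by omega)] at hcell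
      exact hne (e1.trans hcell)
    refine ⟨j', by omega, M - 2 - i, hh, ?_⟩
    rw [pv_blocked_eq hInv j' (M - 2 - i) (by omega) hh]
    simp only [pvMk, List.any_eq_true, List.mem_range, Bool.and_eq_true]
    refine ⟨i, hi, j', hj', hP, ?_⟩
    simp only [pvCov, Bool.and_eq_true, Bool.or_eq_true, beq_iff_eq]
    exact ⟨Or.inr (by omega), by simp⟩

-- getD helpers
lemma pv_eq_of_getD {α : Type} (l1 l2 : List α) (d : α) (hlen : l1.length = l2.length)
    (h : ∀ i, i < l1.length → l1.getD i d = l2.getD i d) : l1 = l2 := by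
  apply List.ext_getElem hlen
  intro i h1 h2
  have h3 := h i h1
  rwa [List.getD_eq_getElem _ _ h1, List.getD_eq_getElem _ _ h2] at h3

lemma pv_getD_append_left {α : Type} (l1 l2 : List α) (d : α) {i : Nat} (h : i < l1.length) :
    (l1 ++ l2).getD i d = l1.getD i d := by
  rw [List.getD_eq_getElem _ _ (by simp; omega), List.getD_eq_getElem _ _ h,
    List.getElem_append_left h]

lemma pv_getD_append_right {α : Type} (l1 l2 : List α) (d : α) {i : Nat}
    (h : l1.length ≤ i) :
    (l1 ++ l2).getD i d = l2.getD (i - l1.length) d := by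
  rw [List.getD_eq_getElem?_getD, List.getD_eq_getElem?_getD, List.getElem?_append_right h]

lemma pv_getD_replicate {α : Type} (n : Nat) (a d : α) {i : Nat} (h : i < n) :
    (List.replicate n a).getD i d = a := by
  rw [List.getD_eq_getElem _ _ (by simpa using h)]
  simp

lemma pv_getD_reverse {α : Type} (l : List α) (d : α) {k : Nat} (h : k < l.length) :
    l.reverse.getD k d = l.getD (l.length - 1 - k) d := by
  rw [List.getD_eq_getElem _ _ (by simpa using h), List.getElem_reverse,
    List.getD_eq_getElem _ _ (by omega)]

lemma pv_getD_map_enum {β : Type} (st : List Char) (f : Int × Char → β) (d : β) {k : Nat}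
    (hk : k < st.length) :
    ((PySem.List.enumerate st).map f).getD k d = f ((k : Int), st.getD k ' ') := by
  rw [List.getD_eq_getElem _ _ (by simp [PySem.List.length_enumerate]; omega),
    List.getElem_map, PySem.List.getElem_enumerate, List.getD_eq_getElem _ _ hk]
  simp

-- one crush round preserves the invariant
lemma pv_inv_step {M N : Nat} {g stks : List (List Char)} (hInv : pvInv M N g stks) :
    pvInv M N (pvDownA M N (pvCrushA M N g).2) (pvCompact stks) := by
  constructor
  · simp [pvCompact, hInv.1]
  · intro j hj
    have hjlen : j < stks.length := by rw [hInv.1]; exact hj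
    obtain ⟨hL, -⟩ := hInv.2 j hj
    -- the j-th compacted stack
    have hstack : (pvCompact stks).getD j []
        = ((PySem.List.enumerate (stks.getD j [])).filter
            (fun q => q.2 != '-' && !pvBlocked stks (j : Int) q.1)).map (fun q => q.2) := by
      unfold pvCompact
      rw [List.getD_eq_getElem?_getD, List.getElem?_map, PySem.List.getElem?_enumerate,
        List.getElem?_eq_getElem hjlen]
      simp only [Option.map_some, Option.getD_some, zero_add]
      rw [List.getD_eq_getElem _ _ hjlen]
    -- replace blocked by A's marking inside the filter
    have hfilt : (PySem.List.enumerate (stks.getD j [])).filter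
          (fun q => q.2 != '-' && !pvBlocked stks (j : Int) q.1)
        = (PySem.List.enumerate (stks.getD j [])).filter
          (fun q => q.2 != '-' && !pvMk M N g (M - 1 - q.1.toNat) j) := by
      apply List.filter_congr
      intro q hq
      rw [PySem.List.mem_enumerate_iff] at hq
      obtain ⟨k, hk, rfl⟩ := hq
      simp only [zero_add, Int.toNat_natCast]
      rw [pv_blocked_eq hInv j k hj hk]
    -- the crushed column in terms of the old stack
    have hcc : (List.range M).map (fun i => pvGet2 (pvCrushA M N g).2 i j)
        = List.replicate (M - (stks.getD j []).length) '-'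
          ++ ((PySem.List.enumerate (stks.getD j [])).map
              (fun q => if pvMk M N g (M - 1 - q.1.toNat) j then '-' else q.2)).reverse := by
      apply pv_eq_of_getD _ _ ' '
      · simp only [List.length_map, List.length_range, List.length_append,
          List.length_replicate, List.length_reverse, PySem.List.length_enumerate]
        omega
      · intro i hi
        have hiM : i < M := by simpa using hi
        rw [pv_getD_map_range _ _ _ hiM, pvCrushA_get M N g hiM hj]
        by_cases hpad : i < M - (stks.getD j []).length
        · rw [pv_getD_append_left _ _ _ (by simpa using hpad),
            pv_getD_replicate _ _ _ hpad]
          have hcell : pvGet2 g i j = '-' := by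
            rw [pv_inv_cell hInv hj hiM, if_neg (by omega)]
          rw [hcell, ite_self]
        · rw [pv_getD_append_right _ _ _ (by simp only [List.length_replicate]; omega)]
          rw [List.length_replicate, pv_getD_reverse _ _ (by
            simp only [List.length_map, PySem.List.length_enumerate]; omega)]
          simp only [List.length_map, PySem.List.length_enumerate]
          rw [show (stks.getD j []).length - 1 - (i - (M - (stks.getD j []).length)) = M - 1 - i
            by omega]
          rw [pv_getD_map_enum _ _ _ (by omega)]
          simp only [Int.toNat_natCast]
          rw [show M - 1 - (M - 1 - i) = i by omega]
          have hcell : pvGet2 g i j = (stks.getD j []).getD (M - 1 - i) ' ' := by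
            rw [pv_inv_cell hInv hj hiM, if_pos (by omega)]
          rw [hcell]
    -- the filtered crushed column is the reversed new stack
    have hF : ((List.range M).map (fun i => pvGet2 (pvCrushA M N g).2 i j)).filter (fun c => c != '-')
        = (((PySem.List.enumerate (stks.getD j [])).filter
            (fun q => q.2 != '-' && !pvMk M N g (M - 1 - q.1.toNat) j)).map (fun q => q.2)).reverse := by
      rw [hcc, List.filter_append, List.filter_reverse, List.filter_map]
      have hrepl : (List.replicate (M - (stks.getD j []).length) '-').filter (fun c => c != '-') = [] := by
        simp
      rw [hrepl, List.nil_append]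
      congr 1
      have hfc : (PySem.List.enumerate (stks.getD j [])).filter
            ((fun c => c != '-') ∘ (fun q : Int × Char => if pvMk M N g (M - 1 - q.1.toNat) j then '-' else q.2))
          = (PySem.List.enumerate (stks.getD j [])).filter
            (fun q => q.2 != '-' && !pvMk M N g (M - 1 - q.1.toNat) j) := by
        apply List.filter_congr
        intro q _
        simp only [Function.comp_apply]
        by_cases hmk : pvMk M N g (M - 1 - q.1.toNat) j = true
        · simp [hmk]
        · simp only [Bool.not_eq_true] at hmk
          simp [hmk]
      rw [hfc]
      apply List.map_congr_left
      intro q hq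
      have hq2 := (List.mem_filter.mp hq).2
      simp only [Bool.and_eq_true, Bool.not_eq_true'] at hq2
      rw [if_neg (by simp [hq2.2])]
    constructor
    · rw [hstack, hfilt, List.length_map]
      calc ((PySem.List.enumerate (stks.getD j [])).filter _).length
          ≤ (PySem.List.enumerate (stks.getD j [])).length := List.length_filter_le _ _
        _ = (stks.getD j []).length := PySem.List.length_enumerate _ _
        _ ≤ M := hL
    · rw [pvDownA_col M N (pvCrushA M N g).2 hj, hF, hstack, hfilt, List.length_reverse]

-- both loops run in lockstep
lemma pv_loop {M N : Nat} (fuel : Nat) :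
    ∀ {g stks : List (List Char)}, pvInv M N g stks →
      pvInv M N (pvLoopA M N fuel g) (pvLoopB fuel stks) := by
  induction fuel with
  | zero => intro g stks hInv; exact hInv
  | succ k ih =>
    intro g stks hInv
    have hflag := pv_any_eq hInv
    by_cases hc : (pvCrushA M N g).1 = true
    · simp only [pvLoopA, pvLoopB, hc, hflag, if_true]
      exact ih (pv_inv_step hInv)
    · have hc' : (pvCrushA M N g).1 = false := by
        cases h2 : (pvCrushA M N g).1
        · rfl
        · exact absurd h2 hc
      simp only [pvLoopA, pvLoopB, hc', hflag, Bool.false_eq_true, if_false]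
      exact hInv

-- counting: A's '-'-scan becomes column sums
lemma pv_sum_countP_swap (M N : Nat) (p : Nat → Nat → Bool) :
    ((List.range M).map (fun i => (List.range N).countP (fun j => p i j))).sum
      = ((List.range N).map (fun j => (List.range M).countP (fun i => p i j))).sum := by
  induction M with
  | zero => simp
  | succ M ih =>
    rw [List.range_succ]
    simp only [List.map_append, List.sum_append, List.map_cons, List.map_nil,
      List.countP_append, List.countP_cons, List.countP_nil, List.sum_cons, List.sum_nil]
    rw [ih]
    have : ((List.range N).map (fun j => (List.range M).countP (fun i => p i j)
        + (if p M j then 1 else 0))).sum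
        = ((List.range N).map (fun j => (List.range M).countP (fun i => p i j))).sum
          + ((List.range N).map (fun j => if p M j then 1 else 0)).sum := by
      rw [← List.sum_map_add]
    simp only [Nat.zero_add] at this ⊢
    rw [this, ← PySem.List.sum_map_ite_one_zero_nat]
    omega

lemma pv_count_eq (M N : Nat) (g : List (List Char)) :
    (((List.range M).flatMap (fun i => (List.range N).filter (fun j => pvGet2 g i j == '-'))).length)
      = (((List.range N).map (fun j => ((List.range M).map (fun i => pvGet2 g i j)).count '-')).sum) := by
  rw [List.length_flatMap]
  simp only [Function.comp_def, ← List.countP_eq_length_filter,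
    List.count_eq_countP, List.countP_map]
  exact pv_sum_countP_swap M N (fun i j => pvGet2 g i j == '-')

-- per column: '-'-count of A's grid column from B's surviving stack
lemma pv_count_split (st : List Char) :
    st.count '-' + st.countP (fun c => c != '-') = st.length := by
  induction st with
  | nil => simp
  | cons c cs ih =>
    by_cases hc : c = '-'
    · subst hc
      simp only [List.count_cons, List.countP_cons, List.length_cons]
      simp only [beq_self_eq_true, if_true, bne_self_eq_false, Bool.false_eq_true, if_false]
      omega
    · simp only [List.count_cons, List.countP_cons, List.length_cons]
      rw [if_neg (by simpa using (fun h => hc (by simpa using h))), if_pos (by simpa using hc)]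
      omega

lemma pv_col_count {M N : Nat} {g stks : List (List Char)} (hInv : pvInv M N g stks)
    {j : Nat} (hj : j < N) :
    ((List.range M).map (fun i => pvGet2 g i j)).count '-'
      = M - (stks.getD j []).countP (fun c => c != '-') := by
  obtain ⟨hL, heq⟩ := hInv.2 j hj
  rw [heq, List.count_append, List.count_replicate, List.count_reverse]
  simp only [beq_self_eq_true, if_true]
  have hs := pv_count_split (stks.getD j [])
  omega

lemma pv_sum_sub (N M : Nat) (f : Nat → Nat) (hf : ∀ j < N, f j ≤ M) :
    ((((List.range N).map (fun j => M - f j)).sum : Nat) : Int)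
      = (N : Int) * (M : Int) - (((List.range N).map f).sum : Int) := by
  induction N with
  | zero => simp
  | succ k ih =>
    rw [List.range_succ, List.map_append, List.sum_append, List.map_append, List.sum_append]
    simp only [List.map_cons, List.map_nil, List.sum_cons, List.sum_nil, Nat.add_zero]
    rw [Nat.cast_add, Nat.cast_add, ih (fun j hj => hf j (by omega))]
    have h1 : f k ≤ M := hf k (by omega)
    have h2 : ((M - f k : Nat) : Int) = (M : Int) - (f k : Int) := by omega
    rw [h2]
    push_cast
    ring

-- a list is the range-map of its getD
lemma pv_map_getD {α β : Type} (l : List α) (d : α) (f : α → β) :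
    (List.range l.length).map (fun j => f (l.getD j d)) = l.map f := by
  apply List.ext_getElem
  · simp
  · intro i h1 h2
    simp only [List.getElem_map, List.getElem_range]
    congr 1
    exact List.getD_eq_getElem _ _ (by simpa using h2)

-- the initial board satisfies the invariant
lemma pv_inv_init (m n : Int) (board : List String) :
    pvInv m.toNat n.toNat (board.map (fun s => s.toList))
      ((List.range n.toNat).map (fun j =>
        (List.range m.toNat).reverse.map (fun i => (board.getD i "").toList.getD j ' '))) := by
  constructor
  · simp
  · intro j hj
    have hget : ((List.range n.toNat).map (fun j =>
          (List.range m.toNat).reverse.map (fun i => (board.getD i "").toList.getD j ' '))).getD j []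
        = (List.range m.toNat).reverse.map (fun i => (board.getD i "").toList.getD j ' ') :=
      pv_getD_map_range _ _ _ hj
    rw [hget]
    constructor
    · simp
    · rw [List.length_map, List.length_reverse, List.length_range, Nat.sub_self,
        List.replicate_zero, List.nil_append, ← List.map_reverse, List.reverse_reverse]
      apply List.map_congr_left
      intro i _
      have key : (board.map (fun s => s.toList)).getD i [] = (board.getD i "").toList := by
        rw [List.getD_eq_getElem?_getD, List.getD_eq_getElem?_getD, List.getElem?_map]
        cases board[i]? <;> simp
      rw [pvGet2, key]

-- ===== VERDICT (by name: the statement is the Claim_ definition above) =====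
theorem solution_spec : Claim_equal_solution := by
  intro m n board _ _
  unfold Spec_solution solution solution_alt
  by_cases hdeg : m ≤ 0 ∨ n ≤ 0
  · rw [if_pos hdeg]
    rcases hdeg with h | h
    · simp [Int.toNat_of_nonpos h]
    · simp [Int.toNat_of_nonpos h]
  · rw [if_neg hdeg]
    dsimp only
    have hInv := pv_loop (M := m.toNat) (N := n.toNat) (m.toNat * n.toNat + 1)
      (pv_inv_init m n board)
    set M := m.toNat
    set N := n.toNat
    set gf := pvLoopA M N (M * N + 1) (board.map (fun s => s.toList)) with hgf
    set sf := pvLoopB (M * N + 1) ((List.range N).map (fun j =>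
      (List.range M).reverse.map (fun i => (board.getD i "").toList.getD j ' '))) with hsf
    -- left side: count per column, then by conservation
    rw [pv_count_eq M N gf]
    have hcols : (List.range N).map (fun j => ((List.range M).map (fun i => pvGet2 gf i j)).count '-')
        = (List.range N).map (fun j => M - (sf.getD j []).countP (fun c => c != '-')) :=
      List.map_congr_left (fun j hj => pv_col_count hInv (List.mem_range.mp hj))
    have hbound : ∀ j < N, (sf.getD j []).countP (fun c => c != '-') ≤ M := by
      intro j hj
      obtain ⟨hL, -⟩ := hInv.2 j hj
      exact le_trans List.countP_le_length hL
    rw [hcols, pv_sum_sub N M _ hbound]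
    -- right side: total = N*M, survivors as a range sum
    have htot : (((List.range N).map (fun j =>
          (List.range M).reverse.map (fun i => (board.getD i "").toList.getD j ' '))).map List.length).sum
        = N * M := by
      rw [List.map_map]
      have : (List.length ∘ fun j => (List.range M).reverse.map
          (fun i => (board.getD i "").toList.getD j ' ')) = fun _ => M := by
        funext j
        simp
      rw [this, List.map_const', List.sum_replicate, smul_eq_mul, List.length_range]
    have hsurv : (sf.map (fun st => st.countP (fun c => c != '-'))).sum
        = ((List.range N).map (fun j => (sf.getD j []).countP (fun c => c != '-'))).sum := by
      have hlen : sf.length = N := hInv.1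
      rw [← pv_map_getD sf [] (fun st => st.countP (fun c => c != '-')), hlen]
    rw [htot, hsurv]
    push_cast
    ring
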